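-- pv_equiv track=rewrite | github.com/hey-shiv/polymind | pipeline/epub_to_text.py | rotate_printable_ascii
-- ===== SOURCE A (Python) =====
-- PRINTABLE_ASCII_START = 33
--
-- PRINTABLE_ASCII_END = 126
--
-- PRINTABLE_ASCII_SPAN = PRINTABLE_ASCII_END - PRINTABLE_ASCII_START + 1
--
-- ROTATED_ASCII_SHIFT = 29
--
-- def rotate_printable_ascii(text: str, shift: int = ROTATED_ASCII_SHIFT) -> str:
--     """Decode text that has been rotated across printable ASCII characters."""
--
--     rotated_characters: list[str] = []
--
--     for char in text:
--         code_point = ord(char)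
--
--         # Preserve whitespace exactly so paragraph structure stays intact.
--         if char.isspace():
--             rotated_characters.append(char)
--             continue
--
--         if PRINTABLE_ASCII_START <= code_point <= PRINTABLE_ASCII_END:
--             normalized = code_point - PRINTABLE_ASCII_START
--             rotated = (normalized + shift) % PRINTABLE_ASCII_SPAN
--             rotated_characters.append(chr(rotated + PRINTABLE_ASCII_START))
--         else:
--             rotated_characters.append(char)
--
--     return "".join(rotated_characters)
-- ===== SOURCE B (Python) =====
-- PRINTABLE_ASCII_START = 33
--
-- PRINTABLE_ASCII_END = 126
--
-- PRINTABLE_ASCII_SPAN = PRINTABLE_ASCII_END - PRINTABLE_ASCII_START + 1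
--
-- ROTATED_ASCII_SHIFT = 29
--
--
-- def rotate_printable_ascii(text: str, shift: int = ROTATED_ASCII_SHIFT) -> str:
--     """Decode text that has been rotated across printable ASCII characters."""
--     # Alphabet rotated once by slicing; per-character modular arithmetic disappears.
--     printables = "".join(map(chr, range(PRINTABLE_ASCII_START, PRINTABLE_ASCII_END + 1)))
--     k = shift % PRINTABLE_ASCII_SPAN
--     rot = printables[k:] + printables[:k]
--     # Scan the text as maximal runs: printable runs are rotated wholesale by
--     # indexing the rotated alphabet, everything between them is copied verbatim.
--     pieces = []
--     i = 0
--     n = len(text)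
--     while i < n:
--         j = i
--         while j < n and "!" <= text[j] <= "~":
--             j += 1
--         if j > i:
--             pieces.append("".join(rot[ord(c) - PRINTABLE_ASCII_START] for c in text[i:j]))
--             i = j
--         else:
--             pieces.append(text[i])
--             i += 1
--     return "".join(pieces)
-- ===== Notes on version B (the rewrite author's own statement) =====
-- stated objective: alternative
-- what changed: B rotates the 94-char printable alphabet once by string slicing (no per-character modulo) and then scans the text as maximal printable runs, translating each run by indexing the rotated alphabet and copying the gaps verbatim, instead of A's per-character loop with isspace/range branching and modular arithmetic.
import Mathlib
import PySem

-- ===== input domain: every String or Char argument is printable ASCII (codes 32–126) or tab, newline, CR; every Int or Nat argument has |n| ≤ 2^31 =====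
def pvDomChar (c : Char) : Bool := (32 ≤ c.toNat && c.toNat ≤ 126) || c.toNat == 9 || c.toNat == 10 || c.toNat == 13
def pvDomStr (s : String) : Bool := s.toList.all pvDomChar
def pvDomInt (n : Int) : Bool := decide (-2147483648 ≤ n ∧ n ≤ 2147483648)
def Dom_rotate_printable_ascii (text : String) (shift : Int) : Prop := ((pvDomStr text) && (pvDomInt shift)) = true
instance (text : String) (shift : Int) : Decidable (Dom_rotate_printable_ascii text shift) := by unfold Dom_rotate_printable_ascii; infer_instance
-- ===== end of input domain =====

-- B rotates the printable alphabet once by slicing and scans the text as maximal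
-- printable runs (translated by alphabet indexing) with gaps copied verbatim.

-- ===== PORT A =====
-- literal port of A's per-character loop with its three branches
def rotate_printable_ascii (text : String) (shift : Int) : String :=
  String.mk (text.toList.foldl (fun rotated_characters char =>
    let code_point : Int := (char.toNat : Int)
    if PySem.Chars.isspace char then rotated_characters ++ [char]
    else if 33 ≤ code_point ∧ code_point ≤ 126 then
      let normalized := code_point - 33
      let rotated := PySem.Int.mod (normalized + shift) 94
      rotated_characters ++ [Char.ofNat ((rotated + 33).toNat)]
    else rotated_characters ++ [char]) [])

-- ===== PORT B =====
-- rot[ord(c) - 33]; when B indexes, the index is always in range (the 'none'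
-- IndexError branch is unreachable), so the default is never used
def pvRotChar (rot : List Char) (c : Char) : Char :=
  match PySem.List.pyGet? rot ((c.toNat : Int) - 33) with
  | some r => r
  | none => c

-- inner 'while j < n and "!" <= text[j] <= "~": j += 1' ("!" ≤ c ≤ "~" is 33 ≤ cp ≤ 126)
def pvFindRun (cs : List Char) (n j : Nat) : Nat :=
  if h : j < n then
    if 33 ≤ (cs.getD j default).toNat ∧ (cs.getD j default).toNat ≤ 126 then
      pvFindRun cs n (j + 1)
    else j
  else j
termination_by n - j

-- outer 'while i < n' loop collecting pieces
def pvRotLoop (rot cs : List Char) (n i : Nat) (pieces : List (List Char)) : List (List Char) :=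
  if h : i < n then
    let j := pvFindRun cs n i
    if hj : i < j then
      pvRotLoop rot cs n j
        (pieces ++ [(PySem.List.slice cs (some (i : Int)) (some (j : Int))).map (pvRotChar rot)])
    else
      pvRotLoop rot cs n (i + 1) (pieces ++ [[cs.getD i default]])
  else pieces
termination_by n - i
decreasing_by
  · omega
  · omega

def rotate_printable_ascii_alt (text : String) (shift : Int) : String :=
  let printables : List Char := (PySem.List.pyRange 33 127 1).map (fun cp => Char.ofNat cp.toNat)
  let k : Int := PySem.Int.mod shift 94
  let rot : List Char :=
    PySem.List.slice printables (some k) none ++ PySem.List.slice printables none (some k)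
  String.mk (pvRotLoop rot text.toList text.toList.length 0 []).flatten

-- ===== PRECONDITION & SPEC =====
def Spec_rotate_printable_ascii (text : String) (shift : Int) (out : String) : Prop := out = rotate_printable_ascii_alt text shift
instance (text : String) (shift : Int) (out : String) : Decidable (Spec_rotate_printable_ascii text shift out) := by unfold Spec_rotate_printable_ascii; infer_instance

-- ===== CLAIM (what is proved, stated in full; the proofs are below) =====
def Claim_equal_rotate_printable_ascii : Prop := ∀ (text : String) (shift : Int), Dom_rotate_printable_ascii text shift → Spec_rotate_printable_ascii text shift (rotate_printable_ascii text shift)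

-- ===== LEMMAS AND PROOFS =====

-- the common per-character mapping both programs compute
def pvF (shift : Int) (c : Char) : Char :=
  if 33 ≤ c.toNat ∧ c.toNat ≤ 126 then
    Char.ofNat ((PySem.Int.mod ((c.toNat : Int) - 33 + shift) 94 + 33).toNat)
  else c

theorem pvF_not_printable (shift : Int) (c : Char)
    (h : ¬ (33 ≤ c.toNat ∧ c.toNat ≤ 126)) : pvF shift c = c := by
  simp [pvF, h]

-- A's fold equals a map of pvF (whitespace chars never lie in 33..126)
theorem A_eq_map (text : String) (shift : Int) :
    rotate_printable_ascii text shift = String.mk (text.toList.map (pvF shift)) := by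
  unfold rotate_printable_ascii
  congr 1
  have hfun : (fun (rotated_characters : List Char) (char : Char) =>
      let code_point : Int := (char.toNat : Int)
      if PySem.Chars.isspace char then rotated_characters ++ [char]
      else if 33 ≤ code_point ∧ code_point ≤ 126 then
        let normalized := code_point - 33
        let rotated := PySem.Int.mod (normalized + shift) 94
        rotated_characters ++ [Char.ofNat ((rotated + 33).toNat)]
      else rotated_characters ++ [char])
    = (fun (acc : List Char) (char : Char) => acc ++ [pvF shift char]) := by
    funext acc char
    by_cases hsp : PySem.Chars.isspace char
    · have hnp : ¬ (33 ≤ char.toNat ∧ char.toNat ≤ 126) := by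
        simp [PySem.Chars.isspace] at hsp; omega
      have h2 : ¬ (33 ≤ (char.toNat : Int) ∧ (char.toNat : Int) ≤ 126) := by
        intro ⟨a, b⟩; exact hnp ⟨by exact_mod_cast a, by exact_mod_cast b⟩
      simp [hsp, pvF, hnp]
    · simp only [hsp, Bool.false_eq_true, if_false, pvF]
      by_cases hp : 33 ≤ char.toNat ∧ char.toNat ≤ 126
      · have h2 : 33 ≤ (char.toNat : Int) ∧ (char.toNat : Int) ≤ 126 :=
          ⟨by exact_mod_cast hp.1, by exact_mod_cast hp.2⟩
        simp [hp]
      · have h2 : ¬ (33 ≤ (char.toNat : Int) ∧ (char.toNat : Int) ≤ 126) := by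
          intro ⟨a, b⟩; exact hp ⟨by exact_mod_cast a, by exact_mod_cast b⟩
        simp [hp]
  rw [hfun, PySem.List.foldl_append_singleton_eq_map, List.nil_append]

-- the printable alphabet literal
theorem printables_eq :
    (PySem.List.pyRange 33 127 1).map (fun cp => Char.ofNat cp.toNat)
      = (List.range 94).map (fun t => Char.ofNat (33 + t)) := by
  decide

-- indexing B's rotated alphabet agrees with pvF on printable characters
theorem rotChar_eq_pvF (shift : Int) (c : Char) (hp : 33 ≤ c.toNat ∧ c.toNat ≤ 126) :
    pvRotChar (PySem.List.slice ((PySem.List.pyRange 33 127 1).map (fun cp => Char.ofNat cp.toNat))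
        (some (PySem.Int.mod shift 94)) none
      ++ PySem.List.slice ((PySem.List.pyRange 33 127 1).map (fun cp => Char.ofNat cp.toNat))
        none (some (PySem.Int.mod shift 94))) c
    = pvF shift c := by
  have hk0 : 0 ≤ PySem.Int.mod shift 94 := PySem.Int.mod_nonneg shift (by omega)
  have hk94 : PySem.Int.mod shift 94 < 94 := PySem.Int.mod_lt shift (by omega)
  have hmodeq : PySem.Int.mod shift 94 = shift % 94 := PySem.Int.mod_eq_emod_of_pos (by omega)
  set k : Int := PySem.Int.mod shift 94 with hk
  set kn : Nat := k.toNat with hkn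
  have hkn94 : kn < 94 := by omega
  have hrot : PySem.List.slice ((PySem.List.pyRange 33 127 1).map (fun cp => Char.ofNat cp.toNat)) (some k) none
      ++ PySem.List.slice ((PySem.List.pyRange 33 127 1).map (fun cp => Char.ofNat cp.toNat)) none (some k)
      = ((List.range 94).map (fun t => Char.ofNat (33 + t))).drop kn
        ++ ((List.range 94).map (fun t => Char.ofNat (33 + t))).take kn := by
    rw [PySem.List.slice_from _ hk0, PySem.List.slice_to _ hk0, printables_eq]
  rw [hrot]
  -- the index m = cp - 33
  set m : Nat := c.toNat - 33 with hm
  have hm94 : m < 94 := by omega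
  have hidx : ((c.toNat : Int) - 33) = ((m : Nat) : Int) := by omega
  unfold pvRotChar
  rw [hidx, PySem.List.pyGet?_natCast]
  have hlen : (((List.range 94).map (fun t => Char.ofNat (33 + t))).drop kn).length = 94 - kn := by
    simp
  by_cases hcase : m < 94 - kn
  · -- lands in the dropped (left) part: element = printables[kn + m]
    have : (((List.range 94).map (fun t => Char.ofNat (33 + t))).drop kn
        ++ ((List.range 94).map (fun t => Char.ofNat (33 + t))).take kn)[m]?
        = some (Char.ofNat (33 + (kn + m))) := by
      rw [List.getElem?_append_left (by omega)]
      rw [List.getElem?_drop]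
      simp [List.getElem?_map, List.getElem?_range (by omega : kn + m < 94)]
    rw [this]
    show Char.ofNat (33 + (kn + m)) = pvF shift c
    unfold pvF
    rw [if_pos hp]
    have hmod : PySem.Int.mod ((c.toNat : Int) - 33 + shift) 94 = ((kn + m : Nat) : Int) := by
      rw [PySem.Int.mod_eq_emod_of_pos (by omega)]
      omega
    rw [hmod]
    congr 1
    omega
  · -- wraps into the taken (right) part: element = printables[m + kn - 94]
    have : (((List.range 94).map (fun t => Char.ofNat (33 + t))).drop kn
        ++ ((List.range 94).map (fun t => Char.ofNat (33 + t))).take kn)[m]?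
        = some (Char.ofNat (33 + (m + kn - 94))) := by
      rw [List.getElem?_append_right (by omega)]
      rw [hlen]
      rw [List.getElem?_take_of_lt (by omega)]
      have hix : m - (94 - kn) = m + kn - 94 := by omega
      rw [hix]
      simp [List.getElem?_map, List.getElem?_range (by omega : m + kn - 94 < 94)]
    rw [this]
    show Char.ofNat (33 + (m + kn - 94)) = pvF shift c
    unfold pvF
    rw [if_pos hp]
    have hmod : PySem.Int.mod ((c.toNat : Int) - 33 + shift) 94 = ((m + kn - 94 : Nat) : Int) := by
      rw [PySem.Int.mod_eq_emod_of_pos (by omega)]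
      omega
    rw [hmod]
    congr 1
    omega

-- pvFindRun: bounds and characterisation
theorem pvFindRun_ge (cs : List Char) (n j : Nat) : j ≤ pvFindRun cs n j := by
  fun_induction pvFindRun <;> omega

theorem pvFindRun_le (cs : List Char) (n j : Nat) (h : j ≤ n) : pvFindRun cs n j ≤ n := by
  fun_induction pvFindRun <;> omega

theorem pvFindRun_printable (cs : List Char) (n j : Nat) :
    ∀ t, j ≤ t → t < pvFindRun cs n j →
      33 ≤ (cs.getD t default).toNat ∧ (cs.getD t default).toNat ≤ 126 := by
  fun_induction pvFindRun with
  | case1 j h hp ih =>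
    intro t ht1 ht2
    rcases Nat.eq_or_lt_of_le ht1 with rfl | hlt
    · exact hp
    · exact ih t hlt ht2
  | case2 j h hp =>
    intro t ht1 ht2
    omega
  | case3 j h =>
    intro t ht1 ht2
    omega

theorem pvFindRun_step (cs : List Char) (n j : Nat) (h : j < n)
    (hp : 33 ≤ (cs.getD j default).toNat ∧ (cs.getD j default).toNat ≤ 126) :
    pvFindRun cs n j = pvFindRun cs n (j + 1) := by
  rw [pvFindRun, dif_pos h, if_pos hp]

-- loop invariant: the flattened pieces are the mapped suffix
theorem pvRotLoop_spec (shift : Int) (rot cs : List Char)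
    (hrot : ∀ c, 33 ≤ c.toNat ∧ c.toNat ≤ 126 → pvRotChar rot c = pvF shift c)
    (i : Nat) (pieces : List (List Char)) :
    (pvRotLoop rot cs cs.length i pieces).flatten
      = pieces.flatten ++ (cs.drop i).map (pvF shift) := by
  fun_induction pvRotLoop rot cs cs.length i pieces with
  | case1 i pieces h j hlt ih =>
    rw [ih]
    have hji : i ≤ j := pvFindRun_ge cs cs.length i
    have hjn : j ≤ cs.length := pvFindRun_le cs cs.length i (by omega)
    have hslice : PySem.List.slice cs (some (i : Int)) (some (j : Int))
        = (cs.drop i).take (j - i) := PySem.List.slice_natCast cs i j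
    have hdrop : cs.drop i = (cs.drop i).take (j - i) ++ cs.drop j := by
      have h1 : i + (j - i) = j := by omega
      conv_lhs => rw [← List.take_append_drop (j - i) (cs.drop i)]
      rw [List.drop_drop, h1]
    have hmapeq : ((cs.drop i).take (j - i)).map (pvRotChar rot)
        = ((cs.drop i).take (j - i)).map (pvF shift) := by
      apply List.map_congr_left
      intro c hc
      rcases List.mem_iff_getElem.mp hc with ⟨t, ht, rfl⟩
      have hlen : ((cs.drop i).take (j - i)).length = j - i := by
        simp; omega
      have hel : ((cs.drop i).take (j - i))[t] = cs.getD (i + t) default := by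
        rw [List.getElem_take, List.getElem_drop]
        simp [List.getD, List.getElem?_eq_getElem (by omega : i + t < cs.length)]
      rw [hel]
      exact hrot _ (pvFindRun_printable cs cs.length i (i + t) (by omega) (by omega))
    conv_rhs => rw [hdrop]
    rw [hslice, hmapeq]
    simp
  | case2 i pieces h j hlt ih =>
    rw [ih]
    have hji : i ≤ j := pvFindRun_ge cs cs.length i
    have hij : j = i := by omega
    have hnp : ¬ (33 ≤ (cs.getD i default).toNat ∧ (cs.getD i default).toNat ≤ 126) := by
      intro hp
      have hstep := pvFindRun_step cs cs.length i h hp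
      have h2 := pvFindRun_ge cs cs.length (i + 1)
      omega
    have hdrop : cs.drop i = cs.getD i default :: cs.drop (i + 1) := by
      rw [List.drop_eq_getElem_cons h]
      simp [List.getD, List.getElem?_eq_getElem h]
    rw [hdrop, List.map_cons, pvF_not_printable shift _ hnp]
    simp
  | case3 i pieces h =>
    rw [List.drop_of_length_le (by omega)]
    simp

-- ===== VERDICT (by name: the statement is the Claim_ definition above) =====
theorem rotate_printable_ascii_spec : Claim_equal_rotate_printable_ascii := by
  intro text shift _
  unfold Spec_rotate_printable_ascii
  rw [A_eq_map]
  unfold rotate_printable_ascii_alt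
  congr 1
  rw [pvRotLoop_spec shift _ text.toList (fun c hc => rotChar_eq_pvF shift c hc) 0 []]
  simp
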